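-- pv_equiv track=rewrite | github.com/afontana1/Computer-Sciences | Algorithms & Data Structures/AlgorithmDesign&Techniques/hackerrank/candy.py | candyy
-- ===== SOURCE A (Python) =====
-- def candyy(string):
--     def candy(string):
--         """check for sequences of 3"""
--         for i in range(len(string) - 2):
--             if len(set(string[i : i + 3])) == 1:
--                 new = string.replace(string[i : i + 3], "")
--                 return new
--         return False
--
--     check = string
--     while True:
--         if candy(check):
--             check = candy(check)
--         else:
--             return check
-- ===== SOURCE B (Python) =====
-- def candyy(string):
--     # Single-pass stack: push each char; when the top two equal the next char,
--     # pop them (removing a run of three). O(n) instead of A's repeated rescans.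
--     st = []
--     for ch in string:
--         if len(st) >= 2 and st[-1] == ch and st[-2] == ch:
--             st.pop()
--             st.pop()
--         else:
--             st.append(ch)
--     return "".join(st)
-- ===== Notes on version B (the rewrite author's own statement) =====
-- stated objective: faster
-- what changed: Replaces A's repeated full rescans (find an all-equal window, str.replace it, restart the loop) with a single left-to-right pass over the string keeping a stack and popping when the top two characters equal the incoming one.
-- intended difference: On nonempty strings that cancel completely under repeated removal of three equal adjacent characters (e.g. 'aaa', 'aaabbb'), A returns its last nonempty intermediate string because its loop tests the next result for truthiness and an empty result is falsy, while B returns the fully reduced empty string, the intended result of repeated removal. — e.g. on candyy("aaa"): A returns "aaa", B returns ""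
import Mathlib
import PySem

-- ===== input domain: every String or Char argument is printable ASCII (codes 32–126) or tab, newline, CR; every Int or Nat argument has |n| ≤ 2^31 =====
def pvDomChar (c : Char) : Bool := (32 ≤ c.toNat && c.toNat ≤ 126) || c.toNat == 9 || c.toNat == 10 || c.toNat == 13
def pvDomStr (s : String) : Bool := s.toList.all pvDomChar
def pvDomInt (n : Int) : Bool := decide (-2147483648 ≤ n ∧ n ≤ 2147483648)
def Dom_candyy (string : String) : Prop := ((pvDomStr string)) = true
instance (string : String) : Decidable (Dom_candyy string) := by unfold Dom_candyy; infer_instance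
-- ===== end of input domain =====

-- B replaces A's rescan-and-replace loop with a single-pass stack (measured faster); on nonempty
-- strings that cancel completely A stops one step early (see D_ below), B fully reduces them.

-- ===== PORT A =====
-- A's inner `candy`: for i in range(len-2), on the first all-equal window s[i:i+3]
-- return string.replace(s[i:i+3], ""); `none` = Python's `return False`.
def candyFor (s : List Char) : List Nat → Option (List Char)
  | [] => none
  | i :: rest =>
    if (PySem.Set.ofList (PySem.Chars.slice s (some (i : Int)) (some ((i : Int) + 3)))).length = 1 then
      some (PySem.Chars.replace s (PySem.Chars.slice s (some (i : Int)) (some ((i : Int) + 3))) [])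
    else candyFor s rest

def candyA (s : List Char) : Option (List Char) := candyFor s (List.range (s.length - 2))

-- the `while True` loop; `if candy(check)` is Python truthiness: `False` and `""` end the loop.
-- fuel = length + 1 bounds the iteration count (each productive step removes ≥ 3 chars).
def candyLoop : Nat → List Char → List Char
  | 0, check => check
  | n + 1, check =>
    match candyA check with
    | some s => if s ≠ [] then candyLoop n s else check
    | none => check

def candyy (string : String) : String :=
  String.ofList (candyLoop (string.toList.length + 1) string.toList)

-- ===== PORT B =====
-- literal port of Source B: the stack is kept head-first (Python's st[-1] is the head), joined reversed.
def stepStk (st : List Char) (ch : Char) : List Char :=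
  match st with
  | a :: b :: r => if a = ch ∧ b = ch then r else ch :: st
  | _ => ch :: st

def candyy_alt (string : String) : String :=
  String.ofList ((string.toList.foldl stepStk []).reverse)

-- ===== PRECONDITION & SPEC =====
-- linear one-pass test used only to state D_: does the string cancel completely under
-- repeated removal of three equal adjacent characters? (run-length scan, returns a Bool)
def cancels : List Char → List (Char × Nat) → Bool
  | [], st => st.isEmpty
  | c :: t, [] => cancels t [(c, 1)]
  | c :: t, (d, k) :: st =>
    if c = d then
      if k = 2 then cancels t st else cancels t ((d, k + 1) :: st)
    else cancels t ((c, 1) :: (d, k) :: st)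

-- On nonempty strings that cancel completely under the remove-three-equal-adjacent rule, A returns
-- the last nonempty intermediate string (its loop tests the next result for truthiness and
-- an empty result is falsy), while B returns the fully reduced empty string, the intended result.
def D_candyy (string : String) : Prop :=
  string ≠ "" ∧ cancels string.toList [] = true
instance (string : String) : Decidable (D_candyy string) := by unfold D_candyy; infer_instance

def Spec_candyy (string : String) (out : String) : Prop := ¬ D_candyy string → out = candyy_alt string
instance (string : String) (out : String) : Decidable (Spec_candyy string out) := by unfold Spec_candyy; infer_instance

def pvDiffWitness_candyy : String := "aaa"
def pvDiffWitnessOut_candyy : String × String := ("aaa", "")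

-- ===== CLAIM (what is proved, stated in full; the proofs are below) =====
def Claim_unchanged_candyy : Prop := ∀ (string : String), Dom_candyy string → Spec_candyy string (candyy string)
def Claim_changed_candyy : Prop := Dom_candyy (pvDiffWitness_candyy) ∧ D_candyy (pvDiffWitness_candyy) ∧ candyy (pvDiffWitness_candyy) = pvDiffWitnessOut_candyy.1 ∧ candyy_alt (pvDiffWitness_candyy) = pvDiffWitnessOut_candyy.2 ∧ pvDiffWitnessOut_candyy.1 ≠ pvDiffWitnessOut_candyy.2
def Claim_exact_candyy : Prop := ∀ (string : String), Dom_candyy string → D_candyy string → candyy string ≠ candyy_alt string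

-- ===== LEMMAS AND PROOFS =====

-- triple-free lists: no three equal adjacent characters
def TF (l : List Char) : Prop := ∀ d : Char, ¬ [d, d, d] <:+: l

theorem tf_of_infix {l m : List Char} (h : m <:+: l) (hl : TF l) : TF m :=
  fun d hd => hl d (hd.trans h)

theorem tf_nil : TF [] := by
  intro d hd; simpa using hd.length_le

theorem tf_short {l : List Char} (h : l.length ≤ 2) : TF l := by
  intro d hd; have := hd.length_le; simp at this; omega

theorem tf_reverse {l : List Char} (h : TF l) : TF l.reverse := by
  intro d hd
  have hd' : ([d, d, d] : List Char).reverse <:+: l.reverse := by simpa using hd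
  exact h d (List.reverse_infix.mp hd')

-- stepStk equations
theorem step_pop {a b : Char} {r : List Char} {c : Char} (h1 : a = c) (h2 : b = c) :
    stepStk (a :: b :: r) c = r := by simp [stepStk, h1, h2]

theorem step_push2 {a b : Char} {r : List Char} {c : Char} (h : ¬ (a = c ∧ b = c)) :
    stepStk (a :: b :: r) c = c :: a :: b :: r := by simp [stepStk, h]

theorem step_nil (c : Char) : stepStk [] c = [c] := rfl

theorem step_one (a c : Char) : stepStk [a] c = [c, a] := rfl

-- stepStk preserves triple-freeness of the stack
theorem step_tf {st : List Char} (h : TF st) (c : Char) : TF (stepStk st c) := by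
  have push : (∀ b r, st = c :: b :: r → b ≠ c) → TF (c :: st) := by
    intro hne d hd
    rcases List.infix_cons_iff.mp hd with hp | hi
    · obtain ⟨hdc, hp⟩ := List.cons_prefix_cons.mp hp
      subst hdc
      obtain ⟨w, hw⟩ := hp
      have hw2 : d :: d :: d :: w = d :: st := hw
      injection hw2 with _ hw3
      exact hne d w hw3.symm rfl
    · exact h d hi
  match st, h with
  | [], _ => rw [step_nil]; exact tf_short (by simp)
  | [a], _ => rw [step_one]; exact tf_short (by simp)
  | a :: b :: r, h =>
    by_cases hab : a = c ∧ b = c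
    · rw [step_pop hab.1 hab.2]
      exact tf_of_infix ((List.suffix_cons b r).trans (List.suffix_cons a _)).isInfix h
    · rw [step_push2 hab]
      refine push (fun b' r' hst hb' => ?_) -- head shape would force a = c, b = c
      injection hst with h1 h2; injection h2 with h2 _
      exact hab ⟨h1, h2.symm ▸ hb' ▸ rfl⟩

theorem fold_tf {s : List Char} : ∀ {st : List Char}, TF st → TF (s.foldl stepStk st) := by
  induction s with
  | nil => intro st h; exact h
  | cons c t ih => intro st h; exact ih (step_tf h c)

-- three identical chars through the stack are a no-op (on a triple-free stack)
theorem tripleStep {st : List Char} (h : TF st) (c : Char) :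
    stepStk (stepStk (stepStk st c) c) c = st := by
  match st, h with
  | [], _ => rw [step_nil, step_one, step_pop rfl rfl]
  | [a], _ =>
    by_cases ha : a = c
    · subst ha
      rw [step_one, step_pop rfl rfl, step_nil]
    · rw [step_one, step_push2 (by tauto), step_pop rfl rfl]
  | a :: b :: r, h =>
    by_cases hab : a = c ∧ b = c
    · rw [step_pop hab.1 hab.2]
      match r, h with
      | [], _ => rw [step_nil, step_one, hab.1, hab.2]
      | e :: r', h =>
        have he : e ≠ c := by
          intro hec
          exact h c ⟨[], r', by simp [hab.1, hab.2, hec]⟩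
        have h1 : stepStk (e :: r') c = c :: e :: r' := by
          match r' with
          | [] => rw [step_one]
          | f :: r'' => exact step_push2 (fun hx => he hx.1)
        rw [h1, step_push2 (fun hx => he hx.2), hab.1, hab.2]
    · rw [step_push2 hab]
      by_cases hac : a = c
      · have hbc : b ≠ c := fun hbc => hab ⟨hac, hbc⟩
        rw [step_pop rfl hac]
        have h1 : stepStk (b :: r) c = c :: b :: r := by
          match r with
          | [] => rw [step_one]
          | f :: r2 => exact step_push2 (fun hx => hbc hx.1)
        rw [h1, hac]
      · rw [step_push2 (fun hx => hac hx.2), step_pop rfl rfl]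

-- a triple-free input passes through the stack unchanged
theorem fold_eq_reverse : ∀ (s st : List Char), TF (s.reverse ++ st) → s.foldl stepStk st = s.reverse ++ st := by
  intro s
  induction s with
  | nil => intro st h; simp
  | cons c t ih =>
    intro st h
    have h' : TF (t.reverse ++ (c :: st)) := by simpa using h
    have hpush : stepStk st c = c :: st := by
      match st with
      | [] => rfl
      | [a] => rfl
      | a :: b :: r =>
        by_cases hab : a = c ∧ b = c
        · exact absurd ⟨t.reverse, r, by simp [hab.1, hab.2]⟩ (h' c)
        · exact step_push2 hab
    calc (c :: t).foldl stepStk st = t.foldl stepStk (c :: st) := by rw [List.foldl_cons, hpush]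
    _ = t.reverse ++ (c :: st) := ih (c :: st) h'
    _ = (c :: t).reverse ++ st := by simp

-- === PySem.Chars.replace with old = [d,d,d], new = [] ===

theorem go_zero (old new l acc : List Char) :
    PySem.Chars.replace.go old new 0 l acc = acc.reverse ++ l := rfl

theorem go_succ_nil (old new : List Char) (fuel : Nat) (acc : List Char) :
    PySem.Chars.replace.go old new (fuel + 1) [] acc = acc.reverse := rfl

theorem go_succ_cons (old new : List Char) (fuel : Nat) (c : Char) (t acc : List Char) :
    PySem.Chars.replace.go old new (fuel + 1) (c :: t) acc =
      if old.isPrefixOf (c :: t) then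
        PySem.Chars.replace.go old new fuel (List.drop old.length (c :: t)) (new.reverse ++ acc)
      else PySem.Chars.replace.go old new fuel t (c :: acc) := rfl

theorem go_stk (d : Char) : ∀ (fuel : Nat) (l acc st : List Char), TF st →
    (PySem.Chars.replace.go [d, d, d] [] fuel l acc).foldl stepStk st = (acc.reverse ++ l).foldl stepStk st := by
  intro fuel
  induction fuel with
  | zero => intro l acc st _; rw [go_zero]
  | succ n ih =>
    intro l acc st hst
    match l with
    | [] => rw [go_succ_nil]; simp
    | c :: t =>
      rw [go_succ_cons]
      by_cases hp : ([d, d, d] : List Char).isPrefixOf (c :: t)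
      · rw [if_pos hp]
        obtain ⟨t', ht'⟩ := List.isPrefixOf_iff_prefix.mp hp
        have hdrop : List.drop ([d, d, d] : List Char).length (c :: t) = t' := by
          rw [← ht']; simp
        rw [hdrop]
        have : (([] : List Char).reverse ++ acc) = acc := by simp
        rw [this, ih t' acc st hst]
        have htf : TF (acc.reverse.foldl stepStk st) := fold_tf hst
        calc (acc.reverse ++ t').foldl stepStk st
            = t'.foldl stepStk (acc.reverse.foldl stepStk st) := by rw [List.foldl_append]
          _ = t'.foldl stepStk (([d, d, d]).foldl stepStk (acc.reverse.foldl stepStk st)) := by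
              simp only [List.foldl_cons, List.foldl_nil]
              rw [tripleStep htf d]
          _ = ((acc.reverse ++ [d, d, d]) ++ t').foldl stepStk st := by rw [List.foldl_append, List.foldl_append]
          _ = (acc.reverse ++ (c :: t)).foldl stepStk st := by rw [← ht']; simp
      · rw [if_neg hp, ih t (c :: acc) st hst]
        have : (c :: acc).reverse ++ t = acc.reverse ++ (c :: t) := by simp
        rw [this]

theorem go_len (d : Char) : ∀ (fuel : Nat) (l acc : List Char),
    (PySem.Chars.replace.go [d, d, d] [] fuel l acc).length ≤ acc.length + l.length := by
  intro fuel
  induction fuel with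
  | zero => intro l acc; rw [go_zero]; simp
  | succ n ih =>
    intro l acc
    match l with
    | [] => rw [go_succ_nil]; simp
    | c :: t =>
      rw [go_succ_cons]
      by_cases hp : ([d, d, d] : List Char).isPrefixOf (c :: t)
      · rw [if_pos hp]
        obtain ⟨t', ht'⟩ := List.isPrefixOf_iff_prefix.mp hp
        have hdrop : List.drop ([d, d, d] : List Char).length (c :: t) = t' := by
          rw [← ht']; simp
        have hlen : t'.length + 3 = (c :: t).length := by rw [← ht']; simp
        rw [hdrop]
        have := ih t' (([] : List Char).reverse ++ acc)
        simp only [List.reverse_nil, List.nil_append] at this ⊢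
        omega
      · rw [if_neg hp]
        have := ih t (c :: acc)
        simp at this ⊢
        omega

theorem go_len_occ (d : Char) : ∀ (fuel : Nat) (l acc : List Char), [d, d, d] <:+: l → l.length ≤ fuel →
    (PySem.Chars.replace.go [d, d, d] [] fuel l acc).length + 3 ≤ acc.length + l.length := by
  intro fuel
  induction fuel with
  | zero =>
    intro l acc hocc hlen
    have := hocc.length_le
    simp at this
    omega
  | succ n ih =>
    intro l acc hocc hlen
    match l with
    | [] =>
      have := hocc.length_le
      simp at this
    | c :: t =>
      rw [go_succ_cons]
      by_cases hp : ([d, d, d] : List Char).isPrefixOf (c :: t)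
      · rw [if_pos hp]
        obtain ⟨t', ht'⟩ := List.isPrefixOf_iff_prefix.mp hp
        have hdrop : List.drop ([d, d, d] : List Char).length (c :: t) = t' := by
          rw [← ht']; simp
        have hlen3 : t'.length + 3 = (c :: t).length := by rw [← ht']; simp
        rw [hdrop]
        have := go_len d n t' (([] : List Char).reverse ++ acc)
        simp only [List.reverse_nil, List.nil_append] at this ⊢
        omega
      · rw [if_neg hp]
        have hocc' : [d, d, d] <:+: t := by
          rcases List.infix_cons_iff.mp hocc with h1 | h1
          · exact absurd (List.isPrefixOf_iff_prefix.mpr h1) hp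
          · exact h1
        have := ih t (c :: acc) hocc' (by simp at hlen ⊢; omega)
        simp at this ⊢
        omega

theorem replace_unfold (l : List Char) (d : Char) :
    PySem.Chars.replace l [d, d, d] [] = PySem.Chars.replace.go [d, d, d] [] l.length l [] := by
  rw [PySem.Chars.replace]; rfl

theorem replace_stk {d : Char} {l st : List Char} (h : TF st) :
    (PySem.Chars.replace l [d, d, d] []).foldl stepStk st = l.foldl stepStk st := by
  rw [replace_unfold, go_stk d l.length l [] st h]
  simp

theorem replace_len {d : Char} {l : List Char} (h : [d, d, d] <:+: l) :
    (PySem.Chars.replace l [d, d, d] []).length + 3 ≤ l.length := by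
  rw [replace_unfold]
  have := go_len_occ d l.length l [] h le_rfl
  simpa using this

-- === A's scan ===

theorem slice_window (s : List Char) (i : Nat) :
    PySem.Chars.slice s (some (i : Int)) (some ((i : Int) + 3)) = (s.drop i).take 3 := by
  have h3 : ((i : Int) + 3) = ((i : Int) + ((3 : Nat) : Int)) := by norm_num
  rw [PySem.Chars.slice_eq_listSlice, h3, PySem.List.slice_natCast_add]

theorem set_three {a b c : Char} : (PySem.Set.ofList [a, b, c]).length = 1 ↔ b = a ∧ c = a := by
  by_cases hb : b = a <;> by_cases hc : c = a <;> by_cases hcb : c = b <;>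
    simp [PySem.Set.ofList, PySem.Set.add, PySem.Set.contains, PySem.Set.empty, hb, hc, hcb]

theorem scan_for_some {s t : List Char} : ∀ (idxs : List Nat), (∀ i ∈ idxs, i + 3 ≤ s.length) →
    candyFor s idxs = some t → ∃ d, [d, d, d] <:+: s ∧ t = PySem.Chars.replace s [d, d, d] [] := by
  intro idxs
  induction idxs with
  | nil => intro _ h; simp [candyFor] at h
  | cons i rest ih =>
    intro hbound h
    rw [candyFor] at h
    by_cases hcond : (PySem.Set.ofList (PySem.Chars.slice s (some (i : Int)) (some ((i : Int) + 3)))).length = 1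
    · rw [if_pos hcond] at h
      have hi3 : i + 3 ≤ s.length := hbound i (by simp)
      rw [slice_window] at hcond h
      have hlen : ((s.drop i).take 3).length = 3 := by
        simp
        omega
      obtain ⟨x, y, z, hw⟩ := List.length_eq_three.mp hlen
      rw [hw] at hcond
      obtain ⟨hy, hz⟩ := set_three.mp hcond
      rw [hy, hz] at hw
      rw [hw] at h
      refine ⟨x, ?_, by simpa using h.symm⟩
      have h1 : [x, x, x] <+: s.drop i := hw ▸ List.take_prefix 3 (s.drop i)
      exact h1.isInfix.trans (s.drop_suffix i).isInfix
    · rw [if_neg hcond] at h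
      exact ih (fun j hj => hbound j (List.mem_cons_of_mem i hj)) h

theorem scan_some {s t : List Char} (h : candyA s = some t) :
    ∃ d, [d, d, d] <:+: s ∧ t = PySem.Chars.replace s [d, d, d] [] := by
  refine scan_for_some (List.range (s.length - 2)) (fun i hi => ?_) h
  have := List.mem_range.mp hi
  omega

theorem scan_for_none {s : List Char} : ∀ (k i : Nat), i + k = s.length - 2 →
    candyFor s (List.range' i k) = none → TF (s.drop i) := by
  intro k
  induction k with
  | zero =>
    intro i hik _
    exact tf_short (by simp; omega)
  | succ k ih =>
    intro i hik h
    rw [List.range'_succ, candyFor] at h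
    by_cases hcond : (PySem.Set.ofList (PySem.Chars.slice s (some (i : Int)) (some ((i : Int) + 3)))).length = 1
    · rw [if_pos hcond] at h; cases h
    · rw [if_neg hcond] at h
      have htail : TF (s.drop (i + 1)) := ih (i + 1) (by omega) h
      intro d hd
      have hi : i < s.length := by omega
      rw [List.drop_eq_getElem_cons hi] at hd
      rcases List.infix_cons_iff.mp hd with hp | hinf
      · apply hcond
        rw [slice_window]
        have hp' : [d, d, d] <+: s.drop i := by rw [List.drop_eq_getElem_cons hi]; exact hp
        have htake : ([d, d, d] : List Char) = (s.drop i).take 3 := by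
          have := List.prefix_iff_eq_take.mp hp'
          simpa using this
        rw [← htake]
        exact set_three.mpr ⟨rfl, rfl⟩
      · exact htail d hinf

theorem scan_none {s : List Char} (h : candyA s = none) : TF s := by
  have := scan_for_none (s := s) (s.length - 2) 0 (by omega) (by rwa [← List.range_eq_range'])
  simpa using this

-- === the cancel test vs the stack ===

def expandSt (st : List (Char × Nat)) : List Char := st.flatMap fun p => List.replicate p.2 p.1

def WFadj : List (Char × Nat) → Prop
  | [] => True
  | [_] => True
  | p :: q :: st => p.1 ≠ q.1 ∧ WFadj (q :: st)

def WFst (st : List (Char × Nat)) : Prop :=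
  (∀ p ∈ st, p.2 = 1 ∨ p.2 = 2) ∧ WFadj st

theorem wfadj_tail : ∀ {p : Char × Nat} {st : List (Char × Nat)}, WFadj (p :: st) → WFadj st := by
  intro p st h
  match st with
  | [] => trivial
  | q :: st' => exact h.2

theorem step_push_head {x : Char} {l : List Char} {c : Char} (hx : x ≠ c) :
    stepStk (x :: l) c = c :: x :: l := by
  match l with
  | [] => rw [step_one]
  | y :: l' => exact step_push2 (fun h => hx h.1)

theorem cancels_iff : ∀ (l : List Char) (st : List (Char × Nat)), WFst st →
    (cancels l st = true ↔ l.foldl stepStk (expandSt st) = []) := by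
  intro l
  induction l with
  | nil =>
    intro st hwf
    match st with
    | [] => simp [cancels, expandSt]
    | (d, k) :: st' =>
      have hk : k = 1 ∨ k = 2 := hwf.1 (d, k) (by simp)
      simp only [cancels, List.foldl_nil]
      rw [show ((d, k) :: st').isEmpty = false from rfl]
      simp only [Bool.false_eq_true, false_iff]
      intro h
      have h0 := congrArg List.length h
      simp [expandSt] at h0
      omega
  | cons c t ih =>
    intro st hwf
    match st with
    | [] =>
      rw [show cancels (c :: t) [] = cancels t [(c, 1)] from rfl]
      rw [ih [(c, 1)] ⟨by simp, trivial⟩]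
      have heq : (c :: t).foldl stepStk (expandSt []) = t.foldl stepStk (expandSt [(c, 1)]) := by
        simp [expandSt, step_nil]
      rw [heq]
    | (d, k) :: st' =>
      have hk : k = 1 ∨ k = 2 := hwf.1 (d, k) (by simp)
      by_cases hcd : c = d
      · by_cases hk2 : k = 2
        · subst hk2
          have hwf' : WFst st' := ⟨fun p hp => hwf.1 p (List.mem_cons_of_mem _ hp), wfadj_tail hwf.2⟩
          rw [show cancels (c :: t) ((d, 2) :: st') = cancels t st' from by
            simp only [cancels]; rw [if_pos hcd]; simp]
          rw [ih st' hwf']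
          have hstep : stepStk (expandSt ((d, 2) :: st')) c = expandSt st' := by
            have hexp : expandSt ((d, 2) :: st') = d :: d :: expandSt st' := by
              simp [expandSt]
            rw [hexp, step_pop hcd.symm hcd.symm]
          rw [List.foldl_cons, hstep]
        · have hk1 : k = 1 := by omega
          subst hk1
          have hwf2 : WFst ((d, 2) :: st') :=
            ⟨fun p hp => by
              rcases List.mem_cons.mp hp with h | h
              · right; rw [h]
              · exact hwf.1 p (List.mem_cons_of_mem _ h),
             by
              have hch := hwf.2
              match st' with
              | [] => trivial
              | q :: st'' => exact ⟨hch.1, hch.2⟩⟩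
          rw [show cancels (c :: t) ((d, 1) :: st') = cancels t ((d, 2) :: st') from by
            simp only [cancels]; rw [if_pos hcd]; simp]
          rw [ih ((d, 2) :: st') hwf2]
          have hstep : stepStk (expandSt ((d, 1) :: st')) c = expandSt ((d, 2) :: st') := by
            have h1 : expandSt ((d, 1) :: st') = d :: expandSt st' := by
              simp [expandSt]
            have h2 : expandSt ((d, 2) :: st') = d :: d :: expandSt st' := by
              simp [expandSt]
            rw [h1, h2]
            match st', hwf with
            | [], _ => simp [expandSt, step_one, hcd]
            | (e, m) :: st'', hwf =>
              have hm : m = 1 ∨ m = 2 := hwf.1 (e, m) (by simp)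
              have hde : d ≠ e := (hwf.2).1
              obtain ⟨m', rfl⟩ : ∃ m', m = m' + 1 := ⟨m - 1, by omega⟩
              have hexp : expandSt ((e, m' + 1) :: st'') = e :: (List.replicate m' e ++ expandSt st'') := by
                simp [expandSt, List.replicate_succ]
              rw [hexp, step_push2 (fun h => hde (h.2.trans hcd).symm), hcd]
          rw [List.foldl_cons, hstep]
      · have hwf2 : WFst ((c, 1) :: (d, k) :: st') :=
          ⟨fun p hp => by
            rcases List.mem_cons.mp hp with h | h
            · left; rw [h]
            · exact hwf.1 p h,
           ⟨hcd, hwf.2⟩⟩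
        rw [show cancels (c :: t) ((d, k) :: st') = cancels t ((c, 1) :: (d, k) :: st') from by
          simp only [cancels]; rw [if_neg hcd]]
        rw [ih _ hwf2]
        have hstep : stepStk (expandSt ((d, k) :: st')) c = expandSt ((c, 1) :: (d, k) :: st') := by
          obtain ⟨k', rfl⟩ : ∃ k', k = k' + 1 := ⟨k - 1, by omega⟩
          have hexp : expandSt ((d, k' + 1) :: st') = d :: (List.replicate k' d ++ expandSt st') := by
            simp [expandSt, List.replicate_succ]
          have hexp1 : expandSt ((c, 1) :: (d, k' + 1) :: st') = c :: expandSt ((d, k' + 1) :: st') := by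
            simp [expandSt]
          rw [hexp1, hexp, step_push_head (fun h => hcd h.symm)]
        rw [List.foldl_cons, hstep]

theorem cancels_empty_iff {l : List Char} : cancels l [] = true ↔ l.foldl stepStk [] = [] := by
  have := cancels_iff l [] ⟨by simp, trivial⟩
  simpa [expandSt] using this

-- === A's loop ===

theorem candyLoop_succ (n : Nat) (check : List Char) :
    candyLoop (n + 1) check =
      match candyA check with
      | some s => if s ≠ [] then candyLoop n s else check
      | none => check := rfl

theorem loop_main : ∀ (fuel : Nat) (check : List Char), check.length < fuel →
    (check = [] ∨ check.foldl stepStk [] ≠ []) →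
    candyLoop fuel check = (check.foldl stepStk []).reverse := by
  intro fuel
  induction fuel with
  | zero => intro check hlen _; omega
  | succ n ih =>
    intro check hlen hyp
    rw [candyLoop_succ]
    cases hscan : candyA check with
    | none =>
      dsimp only
      have htf := scan_none hscan
      have : check.foldl stepStk [] = check.reverse := by
        have := fold_eq_reverse check [] (by simpa using tf_reverse htf)
        simpa using this
      rw [this, List.reverse_reverse]
    | some s =>
      dsimp only
      obtain ⟨d, hocc, rfl⟩ := scan_some hscan
      have hstk : (PySem.Chars.replace check [d, d, d] []).foldl stepStk [] = check.foldl stepStk [] :=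
        replace_stk tf_nil
      have hlen3 : (PySem.Chars.replace check [d, d, d] []).length + 3 ≤ check.length :=
        replace_len hocc
      have hchk3 : 3 ≤ check.length := by
        have := hocc.length_le; simpa using this
      have hne : check.foldl stepStk [] ≠ [] := by
        rcases hyp with h | h
        · exfalso; subst h; simp at hchk3
        · exact h
      have hs : PySem.Chars.replace check [d, d, d] [] ≠ [] := by
        intro h0
        apply hne
        rw [← hstk, h0]
        rfl
      rw [if_pos hs]
      rw [ih _ (by omega) (Or.inr (by rw [hstk]; exact hne))]
      rw [hstk]

theorem loop_ne_nil : ∀ (fuel : Nat) (check : List Char), check ≠ [] → candyLoop fuel check ≠ [] := by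
  intro fuel
  induction fuel with
  | zero => intro check h; exact h
  | succ n ih =>
    intro check h
    rw [candyLoop_succ]
    cases hscan : candyA check with
    | none => exact h
    | some s =>
      dsimp only
      by_cases hs : s ≠ []
      · rw [if_pos hs]; exact ih s hs
      · rw [if_neg hs]; exact h

theorem toList_ne_nil {s : String} (h : s ≠ "") : s.toList ≠ [] := by
  intro h0
  apply h
  have := congrArg String.ofList h0
  simpa using this

-- ===== VERDICT (by name: the statement is the Claim_ definition above) =====
theorem candyy_spec : Claim_unchanged_candyy := by
  intro s _
  unfold Spec_candyy
  intro hD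
  unfold candyy candyy_alt
  have hcases : s.toList = [] ∨ s.toList.foldl stepStk [] ≠ [] := by
    unfold D_candyy at hD
    push Not at hD
    by_cases hnil : s = ""
    · left; simp [hnil]
    · right
      intro hfold
      exact hD hnil (cancels_empty_iff.mpr hfold)
  rw [loop_main (s.toList.length + 1) s.toList (by omega) hcases]

theorem candyy_changed : Claim_changed_candyy := by
  unfold Claim_changed_candyy; decide

theorem candyy_tight : Claim_exact_candyy := by
  intro s _ hD heq
  obtain ⟨hne, hnf⟩ := hD
  have hl : s.toList ≠ [] := toList_ne_nil hne
  have h1 : candyLoop (s.toList.length + 1) s.toList ≠ [] := loop_ne_nil _ _ hl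
  have h2 : s.toList.foldl stepStk [] = [] := cancels_empty_iff.mp hnf
  unfold candyy candyy_alt at heq
  rw [h2] at heq
  apply h1
  have := congrArg String.toList heq
  simpa using this
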